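-- pv_equiv track=rewrite | github.com/LikhithHG/LeetCode | Arrays/Two Pointers/3730. Maximum Calories Burnt from Jumps.py | maxCaloriesBurnt
-- ===== SOURCE A (Python) =====
-- from typing import List
--
-- def maxCaloriesBurnt(heights: List[int]) -> int:
--     heights.sort()
--     i, j = 0, len(heights)-1
--     ans, incr = heights[-1]*heights[-1], False
--
--     while i < j:
--         ans += (heights[i] - heights[j]) * (heights[i] - heights[j])
--
--         if incr:
--             i += 1
--
--         else:
--             j -= 1
--
--         incr = not incr
--
--     return ans
-- ===== SOURCE B (Python) =====
-- from typing import List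
--
-- def maxCaloriesBurnt(heights: List[int]) -> int:
--     heights.sort()
--     rev = heights[::-1]
--     zig = [x for pair in zip(rev, heights) for x in pair][:len(heights)]
--     seq = [0] + zig
--     return sum((a - b) ** 2 for a, b in zip(seq, seq[1:]))
-- ===== Notes on version B (the rewrite author's own statement) =====
-- stated objective: alternative
-- what changed: Replaces A's two-pointer while-loop with an in-place accumulator by building the zig-zag order declaratively (interleave the reversed sorted list with the sorted list and truncate to n), prepending 0, and summing squared adjacent differences in a separate pass.
import Mathlib
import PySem

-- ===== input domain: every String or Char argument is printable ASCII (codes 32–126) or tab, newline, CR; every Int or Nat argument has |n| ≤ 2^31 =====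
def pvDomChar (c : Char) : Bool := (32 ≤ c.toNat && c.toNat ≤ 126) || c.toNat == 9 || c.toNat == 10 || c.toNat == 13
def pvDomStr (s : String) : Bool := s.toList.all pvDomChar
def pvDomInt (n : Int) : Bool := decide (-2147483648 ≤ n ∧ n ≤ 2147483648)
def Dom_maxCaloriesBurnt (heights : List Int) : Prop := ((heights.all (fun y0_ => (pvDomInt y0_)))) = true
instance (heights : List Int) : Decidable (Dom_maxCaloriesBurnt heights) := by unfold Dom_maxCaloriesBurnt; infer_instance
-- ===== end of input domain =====

-- B rebuilds the zig-zag order declaratively (interleave the reversed sorted list with the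
-- sorted list, truncate to n) and sums squared adjacent differences in a separate pass, instead
-- of A's two-pointer accumulator loop; both Pythons sort `heights` in place (same mutation);
-- the equivalence proved here is about the return value.

-- ===== PORT A =====
-- A's while loop: state (i, j, ans, incr); terminates since j - i decreases.
def pvLoopA (hs : List Int) (i j : Nat) (ans : Int) (incr : Bool) : Int :=
  if i < j then
    let ans' := ans + (hs.getD i 0 - hs.getD j 0) * (hs.getD i 0 - hs.getD j 0)
    if incr then pvLoopA hs (i + 1) j ans' (!incr)
    else pvLoopA hs i (j - 1) ans' (!incr)
  else ans
termination_by j - i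

def maxCaloriesBurnt (heights : List Int) : Int :=
  let hs := PySem.List.sorted heights (fun x => x) false   -- heights.sort()
  match PySem.List.pyGet? hs (-1) with                      -- heights[-1]; none = IndexError
  | none => 0                                               -- unreachable under Pre_
  | some last => pvLoopA hs 0 (hs.length - 1) (last * last) false

-- ===== PORT B =====
-- [x for pair in zip(rev, heights) for x in pair]
def pvInterleave : List Int → List Int → List Int
  | a :: as, b :: bs => a :: b :: pvInterleave as bs
  | _, _ => []

def maxCaloriesBurnt_alt (heights : List Int) : Int :=
  let hs := PySem.List.sorted heights (fun x => x) false            -- heights.sort()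
  let rev := (PySem.List.slice? hs none none (-1)).getD []          -- heights[::-1] (step -1: always some)
  let zig := (pvInterleave rev hs).take hs.length
  let seq := 0 :: zig
  ((seq.zip seq.tail).map (fun p => (p.1 - p.2) ^ 2)).sum           -- sum((a-b)**2 for a,b in zip(seq, seq[1:]))

-- ===== PRECONDITION & SPEC =====
-- Pre_ excludes only the empty list, on which A raises IndexError at heights[-1].
def Pre_maxCaloriesBurnt (heights : List Int) : Prop := heights ≠ []
instance (heights : List Int) : Decidable (Pre_maxCaloriesBurnt heights) := by unfold Pre_maxCaloriesBurnt; infer_instance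

def pvWitness_maxCaloriesBurnt : List Int := [3, 1, 2]

def Spec_maxCaloriesBurnt (heights : List Int) (out : Int) : Prop := out = maxCaloriesBurnt_alt heights
instance (heights : List Int) (out : Int) : Decidable (Spec_maxCaloriesBurnt heights out) := by unfold Spec_maxCaloriesBurnt; infer_instance

-- ===== CLAIM (what is proved, stated in full; the proofs are below) =====
def Claim_equal_maxCaloriesBurnt : Prop := ∀ (heights : List Int), Dom_maxCaloriesBurnt heights → Pre_maxCaloriesBurnt heights → Spec_maxCaloriesBurnt heights (maxCaloriesBurnt heights)

-- ===== LEMMAS AND PROOFS =====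

-- pure version of A's loop (no accumulator)
def pvG (hs : List Int) (i j : Nat) (incr : Bool) : Int :=
  if i < j then
    (hs.getD i 0 - hs.getD j 0) * (hs.getD i 0 - hs.getD j 0) +
      (if incr then pvG hs (i + 1) j (!incr) else pvG hs i (j - 1) (!incr))
  else 0
termination_by j - i

theorem pvG_lt_false {hs : List Int} {i j : Nat} (h : i < j) :
    pvG hs i j false =
      (hs.getD i 0 - hs.getD j 0) * (hs.getD i 0 - hs.getD j 0) + pvG hs i (j - 1) true := by
  conv_lhs => rw [pvG]
  simp [h]

theorem pvG_lt_true {hs : List Int} {i j : Nat} (h : i < j) :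
    pvG hs i j true =
      (hs.getD i 0 - hs.getD j 0) * (hs.getD i 0 - hs.getD j 0) + pvG hs (i + 1) j false := by
  conv_lhs => rw [pvG]
  simp [h]

theorem pvG_ge {hs : List Int} {i j : Nat} (h : ¬ i < j) : pvG hs i j b = 0 := by
  rw [pvG]; simp [h]

theorem pvLoopA_eq (hs : List Int) (i j : Nat) (ans : Int) (incr : Bool) :
    pvLoopA hs i j ans incr = ans + pvG hs i j incr := by
  unfold pvLoopA pvG
  split
  · split
    · rw [pvLoopA_eq]; ring
    · rw [pvLoopA_eq]; ring
  · ring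
termination_by j - i

-- the zig-zag segment of hs between indices i and j; hiSide = take from the high end next
def pvZ (hs : List Int) (i j : Nat) (hiSide : Bool) : List Int :=
  if i = j then [hs.getD i 0]
  else if i < j then
    (if hiSide then hs.getD j 0 :: pvZ hs i (j - 1) false
     else hs.getD i 0 :: pvZ hs (i + 1) j true)
  else []
termination_by j - i

theorem pvZ_self (hs : List Int) (i : Nat) (b : Bool) : pvZ hs i i b = [hs.getD i 0] := by
  rw [pvZ]; simp

theorem pvZ_lt_true {hs : List Int} {i j : Nat} (h : i < j) :
    pvZ hs i j true = hs.getD j 0 :: pvZ hs i (j - 1) false := by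
  conv_lhs => rw [pvZ]
  simp [Nat.ne_of_lt h, h]

theorem pvZ_lt_false {hs : List Int} {i j : Nat} (h : i < j) :
    pvZ hs i j false = hs.getD i 0 :: pvZ hs (i + 1) j true := by
  conv_lhs => rw [pvZ]
  simp [Nat.ne_of_lt h, h]

theorem pvZ_head_true {hs : List Int} {i j : Nat} (hij : i ≤ j) :
    pvZ hs i j true = hs.getD j 0 :: (pvZ hs i j true).tail := by
  rcases Nat.lt_or_ge i j with h | h
  · rw [pvZ_lt_true h]; simp
  · have : i = j := le_antisymm hij h
    subst this; rw [pvZ_self]; simp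

theorem pvZ_head_false {hs : List Int} {i j : Nat} (hij : i ≤ j) :
    pvZ hs i j false = hs.getD i 0 :: (pvZ hs i j false).tail := by
  rcases Nat.lt_or_ge i j with h | h
  · rw [pvZ_lt_false h]; simp
  · have : i = j := le_antisymm hij h
    subst this; rw [pvZ_self]; simp

def pvAdjSq (l : List Int) : Int := ((l.zip l.tail).map (fun p => (p.1 - p.2) ^ 2)).sum

theorem pvAdjSq_cons (a b : Int) (l : List Int) :
    pvAdjSq (a :: b :: l) = (a - b) ^ 2 + pvAdjSq (b :: l) := by
  simp [pvAdjSq]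

theorem pvAdjSq_Z (hs : List Int) (i j : Nat) (b : Bool) (hij : i ≤ j) :
    pvAdjSq (pvZ hs i j b) = pvG hs i j (!b) := by
  rcases Nat.lt_or_ge i j with h | h
  · cases b
    · have h' : i + 1 ≤ j := h
      rw [pvZ_lt_false h, pvZ_head_true h', pvAdjSq_cons, ← pvZ_head_true h',
        pvAdjSq_Z hs (i + 1) j true h']
      show _ = pvG hs i j true
      rw [pvG_lt_true h]
      simp only [Bool.not_true]
      ring
    · have h1 : i ≤ j - 1 := by omega
      rw [pvZ_lt_true h, pvZ_head_false h1, pvAdjSq_cons, ← pvZ_head_false h1,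
        pvAdjSq_Z hs i (j - 1) false h1]
      show _ = pvG hs i j false
      rw [pvG_lt_false h]
      simp only [Bool.not_false]
      ring
  · have : i = j := le_antisymm hij h
    subst this
    rw [pvZ_self, pvG_ge (by omega)]
    simp [pvAdjSq]
termination_by j - i
decreasing_by all_goals omega

-- the interleave-take construction equals the index zig-zag
theorem pvZig_eq (hs : List Int) (i j : Nat) (hj : j < hs.length) (hij : i ≤ j) :
    (pvInterleave (hs.reverse.drop (hs.length - 1 - j)) (hs.drop i)).take (j - i + 1) =
      pvZ hs i j true := by
  have hrj : hs.length - 1 - j < hs.reverse.length := by simp; omega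
  have hi : i < hs.length := lt_of_le_of_lt hij hj
  rw [List.drop_eq_getElem_cons hrj, List.drop_eq_getElem_cons hi]
  have hgr : hs.reverse[hs.length - 1 - j]'hrj = hs[j]'hj := by
    rw [List.getElem_reverse]; congr 1; omega
  rcases Nat.lt_or_ge i j with h | h
  · rw [pvZ_lt_true h]
    rcases Nat.lt_or_ge i (j - 1) with h2 | h2
    · -- j ≥ i + 2 : two elements, then recurse
      have hj1 : j - 1 < hs.length := by omega
      rw [pvZ_lt_false h2]
      have ih := pvZig_eq hs (i + 1) (j - 1) hj1 (by omega)
      have hA : hs.length - 1 - j + 1 = hs.length - 1 - (j - 1) := by omega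
      have hT : j - i + 1 = (j - 1 - (i + 1) + 1) + 1 + 1 := by omega
      rw [hT]
      simp only [pvInterleave, List.take_succ_cons]
      rw [hA, ih]
      simp [List.getD_eq_getElem?_getD, hj, hi, hgr]
    · -- j = i + 1 : exactly two elements
      have hji : j - 1 = i := by omega
      rw [hji, pvZ_self]
      have hT : j - i + 1 = 2 := by omega
      rw [hT]
      simp [pvInterleave, List.getD_eq_getElem?_getD, hj, hi, hgr]
  · -- i = j : one element
    have : i = j := le_antisymm hij h
    subst this
    rw [pvZ_self]
    simp [pvInterleave, List.getD_eq_getElem?_getD, hi, hgr]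
termination_by j - i
decreasing_by omega

-- A's match-and-loop equals B's prepend-0 adjacent-squares sum, for any nonempty list
theorem pvMain (hs : List Int) (hne : hs ≠ []) :
    (match PySem.List.pyGet? hs (-1) with
     | none => 0
     | some last => pvLoopA hs 0 (hs.length - 1) (last * last) false) =
    pvAdjSq (0 :: (pvInterleave ((PySem.List.slice? hs none none (-1)).getD []) hs).take hs.length) := by
  have hlen : 0 < hs.length := List.length_pos_iff.mpr hne
  have hj : hs.length - 1 < hs.length := by omega
  have hlast : PySem.List.pyGet? hs (-1) = some (hs.getD (hs.length - 1) 0) := by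
    rw [PySem.List.pyGet?_neg_one, List.getLast?_eq_getElem?]
    simp [List.getD_eq_getElem?_getD, hj]
  rw [hlast, PySem.List.slice?_none_none_neg_one]
  simp only [Option.getD_some]
  have hzig : (pvInterleave hs.reverse hs).take hs.length = pvZ hs 0 (hs.length - 1) true := by
    have hz := pvZig_eq hs 0 (hs.length - 1) hj (Nat.zero_le _)
    simpa [show hs.length - 1 + 1 = hs.length from by omega,
      show hs.length - 1 - (hs.length - 1) = 0 from by omega] using hz
  rw [hzig]
  show pvLoopA hs 0 (hs.length - 1) _ false = _
  rw [pvLoopA_eq]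
  have hh := pvZ_head_true (hs := hs) (i := 0) (j := hs.length - 1) (Nat.zero_le _)
  rw [hh, pvAdjSq_cons, ← hh, pvAdjSq_Z hs 0 (hs.length - 1) true (Nat.zero_le _)]
  simp only [Bool.not_true]
  ring

-- ===== VERDICT (by name: the statement is the Claim_ definition above) =====
theorem maxCaloriesBurnt_spec : Claim_equal_maxCaloriesBurnt := by
  intro heights _ hpre
  unfold Spec_maxCaloriesBurnt
  have hne : PySem.List.sorted heights (fun x => x) false ≠ [] := by
    intro h0
    apply hpre
    have hl := PySem.List.length_sorted (xs := heights) (key := fun x : Int => x) (rev := false)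
    rw [h0] at hl
    exact List.eq_nil_of_length_eq_zero (by simpa using hl.symm)
  exact pvMain (PySem.List.sorted heights (fun x => x) false) hne
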